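-- pv_equiv track=rewrite | github.com/tknrsgym/quara | quara/simulation/standard_qtomography_simulation_report.py | _generate_trace_div
-- ===== SOURCE A (Python) =====
-- from typing import List, Optional
--
-- def _generate_trace_div(fig_info_list: List[dict]) -> str:
--     col_n = len(fig_info_list) if len(fig_info_list) <= 4 else 4
--     css_class = f"box_col{col_n}"
--     div_lines = []
--     div_line = ""
--     for i, fig_info in enumerate(fig_info_list):
--         div_line += f"<div class='{css_class}'><img src={fig_info['image_path']}></div>"
--
--         if i % col_n == col_n - 1:
--             div_lines.append(f"<div class='div_line'>{div_line}</div>")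
--             div_line = ""
--     else:
--         if div_line:
--             div_lines.append(f"<div class='div_line'>{div_line}</div>")
--
--     graph_block_html = f"<div class='div_line'>{''.join(div_lines)}</div>"
--     return graph_block_html
-- ===== SOURCE B (Python) =====
-- def _generate_trace_div(fig_info_list):
--     n = len(fig_info_list)
--     col_n = n if n <= 4 else 4
--     css_class = f"box_col{col_n}"
--     rows = []
--     rest = fig_info_list
--     while rest:
--         chunk, rest = rest[:col_n], rest[col_n:]
--         row = "".join(f"<div class='{css_class}'><img src={fi['image_path']}></div>" for fi in chunk)
--         rows.append(f"<div class='div_line'>{row}</div>")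
--     return f"<div class='div_line'>{''.join(rows)}</div>"
-- ===== Notes on version B (the rewrite author's own statement) =====
-- stated objective: simpler
-- what changed: Replaces A's enumerate loop with a modulus-triggered row accumulator and trailing-row flush by an explicit chunk-at-a-time while loop (slice off col_n figures, join their img divs, wrap the row), which needs no flush step.
import Mathlib
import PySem

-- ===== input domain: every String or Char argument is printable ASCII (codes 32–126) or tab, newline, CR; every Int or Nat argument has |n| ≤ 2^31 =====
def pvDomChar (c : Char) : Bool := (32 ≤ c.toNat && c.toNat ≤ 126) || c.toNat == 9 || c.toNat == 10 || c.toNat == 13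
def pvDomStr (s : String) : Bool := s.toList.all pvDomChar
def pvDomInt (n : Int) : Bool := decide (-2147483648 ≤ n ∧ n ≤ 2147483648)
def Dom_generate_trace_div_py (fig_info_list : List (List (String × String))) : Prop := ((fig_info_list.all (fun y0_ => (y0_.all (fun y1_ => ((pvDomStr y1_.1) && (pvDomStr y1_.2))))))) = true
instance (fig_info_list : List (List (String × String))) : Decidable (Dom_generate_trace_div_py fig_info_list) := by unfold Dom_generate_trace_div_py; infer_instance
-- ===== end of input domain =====

-- B replaces A's enumerate/modulus row-accumulator with an explicit chunk-by-chunk while loop (simpler decomposition).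
-- fig_info['image_path'] raises KeyError when the key is missing in either program; Pre_ excludes exactly that.

-- ===== PORT A =====
-- shared f-string of both Pythons: "<div class='{css}'><img src={fig_info['image_path']}></div>";
-- the dict lookup is first-match on the association list; the "" default is unreachable under Pre_
-- (Python raises KeyError there).
def pvImgDiv (css : String) (fi : List (String × String)) : String :=
  "<div class='" ++ css ++ "'><img src=" ++ ((fi.lookup "image_path").getD "") ++ "></div>"

def pvWrapLine (s : String) : String := "<div class='div_line'>" ++ s ++ "</div>"

-- A's for-loop over enumerate(fig_info_list): i and col_n are non-negative Python ints, so Nat `%`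
-- coincides with Python `%`; when the list is empty the loop body (the only place `% col_n` occurs)
-- never executes, so col_n = 0 is harmless, as in Python.
def pvLoopA (css : String) (c : Nat) (i : Nat) (lines : List String) (line : String) :
    List (List (String × String)) → List String × String
  | [] => (lines, line)
  | fi :: rest =>
    let line' := line ++ pvImgDiv css fi
    if i % c = c - 1 then pvLoopA css c (i + 1) (lines ++ [pvWrapLine line']) "" rest
    else pvLoopA css c (i + 1) lines line' rest

def generate_trace_div_py (fig_info_list : List (List (String × String))) : String :=
  let col_n : Int := if (fig_info_list.length : Int) ≤ 4 then (fig_info_list.length : Int) else 4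
  let css_class : String := "box_col" ++ PySem.Int.toStr col_n
  let res := pvLoopA css_class col_n.toNat 0 [] "" fig_info_list
  let div_lines := if res.2 ≠ "" then res.1 ++ [pvWrapLine res.2] else res.1
  "<div class='div_line'>" ++ PySem.Str.join "" div_lines ++ "</div>"

-- ===== PORT B =====
-- B's while loop: chunk = rest[:col_n], rest = rest[col_n:].  On a non-empty rest = fi :: t and
-- col_n ≥ 1 (always true when the loop runs), rest[col_n:] = t.drop (col_n - 1); exact.
def pvRowsB (css : String) (c : Nat) : List (List (String × String)) → List String
  | [] => []
  | fi :: rest =>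
    pvWrapLine (PySem.Str.join "" (((fi :: rest).take c).map (pvImgDiv css))) ::
      pvRowsB css c (rest.drop (c - 1))
termination_by l => l.length
decreasing_by simp only [List.length_cons, List.length_drop]; omega

def generate_trace_div_py_alt (fig_info_list : List (List (String × String))) : String :=
  let col_n : Int := if (fig_info_list.length : Int) ≤ 4 then (fig_info_list.length : Int) else 4
  let css_class : String := "box_col" ++ PySem.Int.toStr col_n
  "<div class='div_line'>" ++ PySem.Str.join "" (pvRowsB css_class col_n.toNat fig_info_list) ++ "</div>"

-- ===== PRECONDITION & SPEC =====
-- Pre_ excludes exactly the inputs where Python raises KeyError: some dict lacks the key 'image_path'.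
def Pre_generate_trace_div_py (fig_info_list : List (List (String × String))) : Prop :=
  ∀ fi ∈ fig_info_list, (fi.lookup "image_path").isSome = true
instance (fig_info_list : List (List (String × String))) : Decidable (Pre_generate_trace_div_py fig_info_list) := by unfold Pre_generate_trace_div_py; infer_instance

def pvWitness_generate_trace_div_py : (List (List (String × String))) :=
  [[("image_path", "a.png")], [("image_path", "b.png")]]

def Spec_generate_trace_div_py (fig_info_list : List (List (String × String))) (out : String) : Prop := out = generate_trace_div_py_alt fig_info_list
instance (fig_info_list : List (List (String × String))) (out : String) : Decidable (Spec_generate_trace_div_py fig_info_list out) := by unfold Spec_generate_trace_div_py; infer_instance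

-- ===== CLAIM (what is proved, stated in full; the proofs are below) =====
def Claim_equal_generate_trace_div_py : Prop := ∀ (fig_info_list : List (List (String × String))), Dom_generate_trace_div_py fig_info_list → Pre_generate_trace_div_py fig_info_list → Spec_generate_trace_div_py fig_info_list (generate_trace_div_py fig_info_list)

-- ===== LEMMAS AND PROOFS =====

-- A's accumulator loop, rephrased with the current phase j = i % c instead of the absolute index i
-- (proof-only helper).
def pvRowsFrom (css : String) (c : Nat) (j : Nat) (line : String) :
    List (List (String × String)) → List String
  | [] => if line ≠ "" then [pvWrapLine line] else []
  | fi :: rest =>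
    let line' := line ++ pvImgDiv css fi
    if j = c - 1 then pvWrapLine line' :: pvRowsFrom css c 0 "" rest
    else pvRowsFrom css c (j + 1) line' rest

theorem pvAppend_imgDiv_ne_empty (line css : String) (fi : List (String × String)) :
    line ++ pvImgDiv css fi ≠ "" := by
  intro h
  have h2 := congrArg String.length h
  simp [pvImgDiv, String.length_append] at h2

theorem pvFlatten_intersperse (l : List (List Char)) :
    (List.intersperse [] l).flatten = l.flatten := by
  induction l with
  | nil => rfl
  | cons x t ih =>
    cases t with
    | nil => simp
    | cons y u => simp_all [List.intersperse]

theorem pvCharsJoin_empty (l : List (List Char)) :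
    PySem.Chars.join [] l = l.flatten := by
  simp [PySem.Chars.join, List.intercalate, pvFlatten_intersperse]

theorem pvJoin_empty_nil : PySem.Str.join "" ([] : List String) = "" := by decide

theorem pvStr_empty_append (s : String) : "" ++ s = s := String.ext_iff.mpr (by simp)

theorem pvJoin_empty_cons (s : String) (rest : List String) :
    PySem.Str.join "" (s :: rest) = s ++ PySem.Str.join "" rest :=
  String.ext_iff.mpr (by simp [pvCharsJoin_empty])

theorem pvFoldl_eq_join (f : List (String × String) → String) (l : List (List (String × String)))
    (init : String) :
    List.foldl (fun s x => s ++ f x) init l = init ++ PySem.Str.join "" (l.map f) := by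
  induction l generalizing init with
  | nil => rw [List.map_nil, pvJoin_empty_nil]; simp
  | cons x t ih =>
    simp only [List.foldl_cons, List.map_cons, ih, pvJoin_empty_cons, String.append_assoc]

theorem pvLoopA_eq (css : String) (c : Nat) (hc : 1 ≤ c) :
    ∀ (xs : List (List (String × String))) (i : Nat) (lines : List String) (line : String),
      (if (pvLoopA css c i lines line xs).2 ≠ "" then
          (pvLoopA css c i lines line xs).1 ++ [pvWrapLine (pvLoopA css c i lines line xs).2]
        else (pvLoopA css c i lines line xs).1)
        = lines ++ pvRowsFrom css c (i % c) line xs := by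
  intro xs
  induction xs with
  | nil =>
    intro i lines line
    simp only [pvLoopA, pvRowsFrom]
    split <;> simp
  | cons fi rest ih =>
    intro i lines line
    simp only [pvLoopA, pvRowsFrom]
    by_cases h : i % c = c - 1
    · have hd := Nat.div_add_mod i c
      have h1 : (i + 1) % c = 0 := by
        have heq : i + 1 = c * (i / c) + c := by omega
        rw [heq, ← Nat.mul_succ]
        exact Nat.mul_mod_right c _
      rw [if_pos h, if_pos h, ih, h1]
      simp [List.append_assoc]
    · have hlt : i % c < c := Nat.mod_lt _ (by omega)
      have hc2 : 2 ≤ c := by omega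
      have hstep : (i + 1) % c = i % c + 1 := by
        rw [Nat.add_mod, Nat.mod_eq_of_lt (show 1 < c by omega), Nat.mod_eq_of_lt (by omega)]
      rw [if_neg h, if_neg h, ih, hstep]

theorem pvRowsFrom_nil_eq (css : String) (c j : Nat) (line : String) :
    pvRowsFrom css c j line [] = if line ≠ "" then [pvWrapLine line] else [] := rfl

theorem pvRowsFrom_cons_eq (css : String) (c j : Nat) (line : String)
    (fi : List (String × String)) (rest : List (List (String × String))) :
    pvRowsFrom css c j line (fi :: rest) =
      if j = c - 1 then pvWrapLine (line ++ pvImgDiv css fi) :: pvRowsFrom css c 0 "" rest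
      else pvRowsFrom css c (j + 1) (line ++ pvImgDiv css fi) rest := rfl

theorem pvRowsFrom_cons (css : String) (c : Nat) (hc : 1 ≤ c) :
    ∀ (xs : List (List (String × String))) (fi : List (String × String)) (j : Nat) (line : String),
      j < c →
      pvRowsFrom css c j line (fi :: xs) =
        pvWrapLine (List.foldl (fun s x => s ++ pvImgDiv css x) line ((fi :: xs).take (c - j))) ::
          pvRowsFrom css c 0 "" ((fi :: xs).drop (c - j)) := by
  intro xs
  induction xs with
  | nil =>
    intro fi j line hj
    rw [pvRowsFrom_cons_eq]
    by_cases h : j = c - 1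
    · rw [if_pos h]
      have h1 : c - j = 1 := by omega
      rw [h1, show (1 : ℕ) = 0 + 1 from rfl, List.take_succ_cons, List.drop_succ_cons]
      simp
    · rw [if_neg h, pvRowsFrom_nil_eq, if_pos (pvAppend_imgDiv_ne_empty line css fi)]
      rw [List.take_of_length_le (by simp; omega), List.drop_eq_nil_of_le (by simp; omega)]
      simp [pvRowsFrom_nil_eq]
  | cons x t ih =>
    intro fi j line hj
    rw [pvRowsFrom_cons_eq]
    by_cases h : j = c - 1
    · rw [if_pos h]
      have h1 : c - j = 1 := by omega
      rw [h1, show (1 : ℕ) = 0 + 1 from rfl, List.take_succ_cons, List.drop_succ_cons]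
      simp
    · rw [if_neg h]
      have hj1 : j + 1 < c := by omega
      have e1 : c - j = (c - (j + 1)) + 1 := by omega
      rw [ih x (j + 1) (line ++ pvImgDiv css fi) hj1, e1, List.take_succ_cons,
        List.drop_succ_cons, List.foldl_cons]

theorem pvRowsFrom_eq_rowsB (css : String) (c : Nat) (hc : 1 ≤ c) :
    ∀ (n : Nat) (xs : List (List (String × String))), xs.length ≤ n →
      pvRowsFrom css c 0 "" xs = pvRowsB css c xs := by
  intro n
  induction n with
  | zero =>
    intro xs h
    have hx : xs = [] := List.eq_nil_of_length_eq_zero (by omega)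
    subst hx
    simp [pvRowsFrom_nil_eq, pvRowsB]
  | succ n ih =>
    intro xs h
    cases xs with
    | nil => simp [pvRowsFrom_nil_eq, pvRowsB]
    | cons fi rest =>
      rw [pvRowsFrom_cons css c hc rest fi 0 "" (by omega), pvFoldl_eq_join]
      simp only [Nat.sub_zero]
      have e : (fi :: rest).drop c = rest.drop (c - 1) := by
        cases c with
        | zero => exact absurd hc (by omega)
        | succ m => simp
      rw [e, ih _ (by simp only [List.length_cons, List.length_drop] at h ⊢; omega)]
      simp only [pvRowsB]
      rw [pvStr_empty_append]

-- ===== VERDICT (by name: the statement is the Claim_ definition above) =====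
theorem generate_trace_div_py_spec : Claim_equal_generate_trace_div_py := by
  unfold Claim_equal_generate_trace_div_py
  intro l _ _
  unfold Spec_generate_trace_div_py generate_trace_div_py generate_trace_div_py_alt
  cases l with
  | nil => simp [pvLoopA, pvRowsB, pvJoin_empty_nil]
  | cons x t =>
    have hc : 1 ≤ (if (((x :: t).length : Int)) ≤ 4 then ((x :: t).length : Int) else 4).toNat := by
      split <;> simp
    dsimp only
    rw [pvLoopA_eq _ _ hc, Nat.zero_mod, List.nil_append,
      pvRowsFrom_eq_rowsB _ _ hc (x :: t).length _ le_rfl]
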